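-- pv_equiv track=rewrite | github.com/MinaPecheux/Advent-Of-Code | 2015/Python/day11.py | get_new_password
-- ===== SOURCE A (Python) =====
-- def create_generator(syms, rolls, start):
--     '''Creates a new generator that works like an odometer.
--
--     :param syms: List of possible symbols on each "gear".
--     :type syms: list(int) or list(str)
--     :param rolls: Number of "gears".
--     :type rolls: int
--     :param start: Initial value of the odometer (as an int).
--     :type start: int
--     :return: Generator of all configurations of the odometer.
--     :rtype: generator
--     '''
--     base = len(syms)
--     combinations = base ** rolls
--
--     # The odometer is to be reversed on delivery.
--     odo = [ syms[0] for i in range(rolls) ]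
--
--     # Odometer start setting:
--     curval = start
--     for i in range(rolls):
--         j = curval % base
--         odo[i] = syms[j]
--         curval = curval // base
--
--     curval = start
--     while curval < combinations:
--         # Consider roll 0 to be rightmost.
--         yield odo[-1::-1]
--         for roll, sym in enumerate(odo[:]):
--             i = syms.index(sym)
--             if i < base - 1:
--                 odo[roll] = syms[i + 1]
--                 # Could roll the roll w/o roll-over, next value:
--                 break
--             else:
--                 odo[roll] = syms[0]
--                 # There was a roll-over, next roll.
--         curval += 1
--
-- ALPHABET = [ chr(i) for i in range(ord('a'), ord('z')+1) ]
--
-- PAIRS = [ c * 2 for c in ALPHABET ]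
--
-- INCREASING_TRIPLES = [
--     'abc', 'bcd', 'cde', 'def', 'efg', 'fgh', 'ghi', 'hij', 'ijk',
--     'jkl', 'klm', 'lmn', 'mno', 'nop', 'opq', 'pqr', 'qrs', 'rst',
--     'stu', 'tuv', 'uvw', 'vwx', 'wxy', 'xyz'
-- ]
--
-- def pwd_is_ok(pwd):
--     '''Checks if a test password meets the following criteria:
--         - include one increasing straight of at least three letters, like abc,
--         bcd, cde, and so on, up to xyz. They cannot skip letters; abd doesn't
--         count.
--         - not contain the letters i, o, or l
--         - must contain at least two different, non-overlapping pairs of letters,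
--         like aa, bb, or zz
--
--     :param pwd: Password to test.
--     :type pwd: str
--     :return: Password validity.
--     :rtype: bool
--     '''
--     if not any(triple in pwd for triple in INCREASING_TRIPLES):
--         return False
--     n_pairs = 0
--     for pair in PAIRS:
--         if pair in pwd:
--             n_pairs += 1
--     return n_pairs >= 2
--
-- def get_new_password(input):
--     '''Searches for the new password based on the previous one (the input).
--
--     :param input: Old password to start from.
--     :type input: str
--     :return: New password.
--     :rtype: str
--     '''
--     start = 0
--     roll = 1
--     for i, c in enumerate(input[::-1]):
--         start += (ord(c) - ord('a')) * roll
--         roll *= len(ALPHABET)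
--     valid = False
--     generator = create_generator(ALPHABET, len(input), start + 1)
--     pwd = input
--     for test in generator:
--         if 'i' in test or 'o' in test or 'l' in test:
--             continue
--         pwd = ''.join(test)
--         if pwd_is_ok(pwd):
--             break
--     return pwd
-- ===== SOURCE B (Python) =====
-- def _ok(ds):
--     straight = False
--     for i in range(len(ds) - 2):
--         if ds[i] + 1 == ds[i + 1] and ds[i + 1] + 1 == ds[i + 2]:
--             straight = True
--             break
--     if not straight:
--         return False
--     pair_digits = set()
--     for i in range(len(ds) - 1):
--         if ds[i] == ds[i + 1]:
--             pair_digits.add(ds[i])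
--     return len(pair_digits) >= 2
--
--
-- def _inc(ds):
--     # add one to a little-endian digit list (wraps to all zeros at the top)
--     i = 0
--     while i < len(ds) and ds[i] == 25:
--         ds[i] = 0
--         i += 1
--     if i < len(ds):
--         ds[i] += 1
--
--
-- def get_new_password(input):
--     n = 0
--     for c in input:
--         n = n * 26 + (ord(c) - 97)
--     rolls = len(input)
--     M = 26 ** rolls
--     pwd = input
--     v = n + 1
--     ds = []
--     if v < M:
--         r = v % M
--         for _ in range(rolls):
--             ds.append(r % 26)
--             r //= 26
--     # from here on ds holds the little-endian base-26 digits of v % M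
--     while v < M:
--         p = -1
--         for i in range(rolls):
--             if ds[i] in (8, 11, 14):  # codes of 'i', 'l', 'o'
--                 p = i
--         if p >= 0:
--             # jump over the whole block sharing this most-significant forbidden digit
--             suf = 0
--             w = 1
--             for j in range(p):
--                 suf += ds[j] * w
--                 w *= 26
--             for j in range(p):
--                 ds[j] = 0
--             ds[p] += 1
--             v += 26 ** p - suf
--             continue
--         rds = ds[::-1]
--         pwd = ''.join(chr(97 + d) for d in rds)
--         if _ok(rds):
--             break
--         v += 1
--         _inc(ds)
--     return pwd
-- ===== Notes on version B (the rewrite author's own statement) =====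
-- stated objective: alternative
-- what changed: B replaces A's symbol-odometer generator (mutable gear list stepped one candidate at a time with syms.index scans, validated by 50 substring searches over PAIRS/INCREASING_TRIPLES tables) by integer counting on a little-endian digit list: the old password is read as a base-26 number with a Horner fold, the counter's digits are kept incrementally with a ripple-carry add, whole blocks sharing a forbidden letter (i/l/o) are skipped at once by bumping that digit and zeroing the lower ones, and validity is checked by single left-to-right scans (consecutive-triple test and a set of adjacent-equal …
import Mathlib
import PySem

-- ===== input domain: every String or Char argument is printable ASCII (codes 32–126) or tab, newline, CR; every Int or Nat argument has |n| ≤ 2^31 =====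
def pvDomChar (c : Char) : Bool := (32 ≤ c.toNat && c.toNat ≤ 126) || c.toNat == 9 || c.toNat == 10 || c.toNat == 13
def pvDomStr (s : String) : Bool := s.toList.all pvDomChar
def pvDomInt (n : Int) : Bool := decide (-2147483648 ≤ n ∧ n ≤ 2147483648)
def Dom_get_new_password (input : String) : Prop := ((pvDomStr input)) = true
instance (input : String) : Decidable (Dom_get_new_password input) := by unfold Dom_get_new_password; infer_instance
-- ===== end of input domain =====

-- B replaces A's odometer generator by an integer counter with direct digit expansion and
-- single-scan validity checks; same return value everywhere (objective: alternative).

-- ===== PORT A =====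
def ALPHABET : List Char := (PySem.List.pyRange 97 123 1).map (fun i => Char.ofNat i.toNat)

def PAIRS : List String := ALPHABET.map (fun c => String.ofList (PySem.List.pyRepeat [c] 2))

def INCREASING_TRIPLES : List String :=
  ["abc", "bcd", "cde", "def", "efg", "fgh", "ghi", "hij", "ijk",
   "jkl", "klm", "lmn", "mno", "nop", "opq", "pqr", "qrs", "rst",
   "stu", "tuv", "uvw", "vwx", "wxy", "xyz"]

def pwd_is_ok (pwd : String) : Bool :=
  if !(INCREASING_TRIPLES.any fun t => PySem.Str.isIn t pwd) then false
  else
    let n_pairs : Int := PAIRS.foldl (fun acc p => if PySem.Str.isIn p pwd then acc + 1 else acc) 0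
    decide (2 ≤ n_pairs)

def genBase : Int := PySem.List.len ALPHABET    -- base = len(syms)

-- the inner `for roll, sym in enumerate(odo[:])` loop of the generator (mutates odo, breaks on a non-rollover)
def incOdo : List Char → List Char
  | [] => []
  | sym :: rest =>
    match PySem.List.index? ALPHABET sym with
    | some i =>
      if (i : Int) < genBase - 1 then PySem.List.pyGetD ALPHABET ((i : Int) + 1) 'a' :: rest
      else PySem.List.pyGetD ALPHABET 0 'a' :: incOdo rest
    | none => sym :: rest   -- unreachable: odo entries always come from ALPHABET, so syms.index never raises

-- the `for test in generator` consumer loop fused with the generator's `while curval < combinations` loop;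
-- fuel = number of yields = (combinations - start).toNat
def genLoop : Nat → List Char → String → String
  | 0, _, pwd => pwd
  | fuel + 1, odo, pwd =>
    let test := (PySem.List.slice? odo (some (-1)) none (-1)).getD []   -- yield odo[-1::-1]
    if test.contains 'i' || test.contains 'o' || test.contains 'l' then
      genLoop fuel (incOdo odo) pwd
    else
      let pwd' := String.ofList (PySem.Chars.join [] (test.map fun c => [c]))   -- ''.join(test)
      if pwd_is_ok pwd' then pwd' else genLoop fuel (incOdo odo) pwd'

def get_new_password (input : String) : String :=
  let rev := (PySem.Str.slice? input none none (-1)).getD ""   -- input[::-1]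
  -- start = 0; roll = 1; for i, c in enumerate(input[::-1]): start += (ord(c)-ord('a'))*roll; roll *= 26
  let st := rev.toList.foldl
    (fun (st : Int × Int) c => (st.1 + ((c.toNat : Int) - ('a'.toNat : Int)) * st.2, st.2 * genBase)) (0, 1)
  let start := st.1
  let rolls : Int := PySem.Str.len input
  let combinations : Int := genBase ^ rolls.toNat   -- base ** rolls (rolls = len(input) ≥ 0)
  -- odo = [syms[0] for i in range(rolls)], then the odometer start-setting loop, curval = start + 1
  let odo0 := (PySem.List.pyRange 0 rolls 1).map (fun _ => PySem.List.pyGetD ALPHABET 0 'a')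
  let init := (PySem.List.pyRange 0 rolls 1).foldl
    (fun (st2 : List Char × Int) i =>
      (PySem.List.pySetD st2.1 i (PySem.List.pyGetD ALPHABET (PySem.Int.mod st2.2 genBase) 'a'),
       PySem.Int.floordiv st2.2 genBase)) (odo0, start + 1)
  genLoop (combinations - (start + 1)).toNat init.1 input

-- ===== PORT B =====
def symChar (d : Int) : Char := Char.ofNat (97 + d).toNat   -- chr(97 + d)

-- the digit-expansion loop of Source B (little-endian digits of r, `rolls` of them)
def digitsLE : Int → Nat → List Int
  | _, 0 => []
  | r, k + 1 => PySem.Int.mod r 26 :: digitsLE (PySem.Int.floordiv r 26) k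

-- the `straight` scan of _ok
def hasStraight : List Int → Bool
  | a :: b :: c :: rest => (a + 1 == b && b + 1 == c) || hasStraight (b :: c :: rest)
  | _ => false

-- the pair-collecting scan of _ok
def collectPairs (s : PySem.Set Int) : List Int → PySem.Set Int
  | a :: b :: rest => collectPairs (if a == b then PySem.Set.add s a else s) (b :: rest)
  | _ => s

def okDigits (ds : List Int) : Bool :=
  if !hasStraight ds then false
  else decide (2 ≤ PySem.Set.len (collectPairs PySem.Set.empty ds))

-- add one to a little-endian digit list (_inc of Source B; wraps to all zeros at the top)
def incLE : List Int → List Int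
  | [] => []
  | d :: rest => if d == 25 then 0 :: incLE rest else (d + 1) :: rest

-- the `while v < M` loop of Source B; ds = little-endian digits of v % M; fuel = (M - v).toNat
-- (an upper bound on the iteration count, since v grows by at least 1 per iteration)
def bLoop : Nat → Int → List Int → Int → Nat → String → String
  | 0, _, _, _, _, pwd => pwd
  | fuel + 1, v, ds, M, rolls, pwd =>
    if v < M then
      let p := (PySem.List.pyRange 0 (rolls : Int) 1).foldl
        (fun acc i => if ([8, 11, 14] : List Int).contains (PySem.List.pyGetD ds i 0) then i else acc) (-1)
      if 0 ≤ p then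
        let suf := ((PySem.List.pyRange 0 p 1).foldl
          (fun (sw : Int × Int) j => (sw.1 + PySem.List.pyGetD ds j 0 * sw.2, sw.2 * 26)) (0, 1)).1
        let ds' := (PySem.List.pyRange 0 p 1).foldl (fun l j => PySem.List.pySetD l j 0) ds
        let ds'' := PySem.List.pySetD ds' p (PySem.List.pyGetD ds' p 0 + 1)
        bLoop fuel (v + (26 ^ p.toNat - suf)) ds'' M rolls pwd
      else
        let rds := (PySem.List.slice? ds none none (-1)).getD []   -- ds[::-1]
        let pwd' := String.ofList (PySem.Chars.join [] (rds.map fun d => [symChar d]))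
        if okDigits rds then pwd' else bLoop fuel (v + 1) (incLE ds) M rolls pwd'
    else pwd

def get_new_password_alt (input : String) : String :=
  let n := input.toList.foldl (fun acc c => acc * 26 + ((c.toNat : Int) - 97)) 0
  let rolls := input.toList.length
  let M : Int := 26 ^ rolls
  let ds := if n + 1 < M then digitsLE (PySem.Int.mod (n + 1) M) rolls else []
  bLoop (M - (n + 1)).toNat (n + 1) ds M rolls input

-- ===== PRECONDITION & SPEC =====
def Spec_get_new_password (input : String) (out : String) : Prop := out = get_new_password_alt input
instance (input : String) (out : String) : Decidable (Spec_get_new_password input out) := by unfold Spec_get_new_password; infer_instance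

-- ===== CLAIM (what is proved, stated in full; the proofs are below) =====
def Claim_equal_get_new_password : Prop := ∀ (input : String), Dom_get_new_password input → Spec_get_new_password input (get_new_password input)

-- ===== LEMMAS AND PROOFS =====

-- § basic tables
lemma genBase_eq : genBase = 26 := by decide

lemma alpha_get (d : Int) (h0 : 0 ≤ d) (h1 : d < 26) :
    PySem.List.pyGetD ALPHABET d 'a' = symChar d := by
  interval_cases d <;> decide

lemma alpha_index (d : Int) (h0 : 0 ≤ d) (h1 : d < 26) :
    PySem.List.index? ALPHABET (symChar d) = some d.toNat := by
  interval_cases d <;> decide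

lemma symChar_toNat (d : Int) (h0 : 0 ≤ d) (h1 : d < 26) : (symChar d).toNat = 97 + d.toNat := by
  unfold symChar
  rw [Char.toNat_ofNat, if_pos]
  · omega
  · exact Or.inl (by omega)

lemma symChar_inj {a b : Int} (ha : 0 ≤ a ∧ a < 26) (hb : 0 ≤ b ∧ b < 26)
    (h : symChar a = symChar b) : a = b := by
  have := congrArg Char.toNat h
  rw [symChar_toNat a ha.1 ha.2, symChar_toNat b hb.1 hb.2] at this
  omega

lemma alpha_eq : ALPHABET = (List.range 26).map (fun (k : Nat) => symChar (k : Int)) := by decide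

-- § odo[-1::-1] is reverse
lemma slice_rev {α : Type} (xs : List α) :
    (PySem.List.slice? xs (some (-1)) none (-1)).getD [] = xs.reverse := by
  unfold PySem.List.slice? PySem.List.sliceIndices
  norm_num
  rcases Nat.eq_zero_or_pos xs.length with h0 | hpos
  · have hx : xs = [] := List.eq_nil_of_length_eq_zero h0
    subst hx
    simp
  · rw [if_pos hpos]
    have hf : (fun k : Nat => xs[((-1 : Int) + (xs.length : Int) + -(k : Int)).toNat]?)
        = (fun k : Nat => some (xs[xs.length - 1 - k]'(by omega))) := by
      funext k
      have hidx : (((-1) : Int) + (xs.length : Int) + -(k : Int)).toNat = xs.length - 1 - k := by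
        omega
      rw [hidx, List.getElem?_eq_getElem (by omega)]
    rw [hf, show (fun k : Nat => some (xs[xs.length - 1 - k]'(by omega)))
        = some ∘ (fun k : Nat => xs[xs.length - 1 - k]'(by omega)) from rfl,
      List.filterMap_eq_map]
    apply List.ext_getElem
    · simp
    · intro i h1 h2
      simp [List.getElem_reverse]

-- incD (proof-side): the digit-level view of incOdo
def incD : List Int → List Int
  | [] => []
  | d :: ds => if d < 25 then (d + 1) :: ds else 0 :: incD ds

-- § digits
lemma digitsLE_succ (r : Int) (k : Nat) :
    digitsLE r (k + 1) = r % 26 :: digitsLE (r / 26) k := by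
  rw [digitsLE, PySem.Int.mod_eq_emod_of_pos (by norm_num),
      PySem.Int.floordiv_eq_ediv_of_pos (by norm_num)]

lemma digitsLE_len (r : Int) (k : Nat) : (digitsLE r k).length = k := by
  induction k generalizing r with
  | zero => rfl
  | succ k ih => rw [digitsLE_succ]; simp [ih]

lemma digitsLE_bounds (r : Int) (k : Nat) : ∀ d ∈ digitsLE r k, 0 ≤ d ∧ d < 26 := by
  induction k generalizing r with
  | zero => simp [digitsLE]
  | succ k ih =>
    rw [digitsLE_succ]
    intro d hd
    rcases List.mem_cons.1 hd with h | h
    · subst h; exact ⟨Int.emod_nonneg _ (by norm_num), Int.emod_lt_of_pos _ (by norm_num)⟩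
    · exact ih _ d h

lemma emod_pow_div (r : Int) (k : Nat) :
    (r % (26 ^ (k + 1) : Int)) / 26 = (r / 26) % 26 ^ k := by
  have hQ : r / 26 / 26 ^ k = r / 26 ^ (k + 1) := by
    rw [Int.ediv_ediv_of_nonneg (by norm_num : (0:Int) ≤ 26), mul_comm, ← pow_succ]
  rw [Int.emod_def, Int.emod_def, ← hQ]
  have h2 : r - 26 ^ (k + 1) * (r / 26 / 26 ^ k)
      = r + 26 * (-(26 ^ k * (r / 26 / 26 ^ k))) := by rw [hQ]; ring
  rw [h2, Int.add_mul_ediv_left _ _ (by norm_num : (26 : Int) ≠ 0)]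
  ring

lemma digitsLE_mod (r : Int) (k : Nat) : digitsLE (r % (26 ^ k : Int)) k = digitsLE r k := by
  induction k generalizing r with
  | zero => rfl
  | succ k ih =>
    rw [digitsLE_succ, digitsLE_succ]
    congr 1
    · exact Int.emod_emod_of_dvd r (dvd_pow_self 26 (Nat.succ_ne_zero k))
    · rw [emod_pow_div, ih]

lemma digitsLE_inc (k : Nat) (r : Int) (h0 : 0 ≤ r) (h1 : r < 26 ^ k) :
    incD (digitsLE r k) = digitsLE ((r + 1) % 26 ^ k) k := by
  induction k generalizing r with
  | zero => rfl
  | succ k ih =>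
    have hdvd : (26 : Int) ∣ 26 ^ (k + 1) := dvd_pow_self 26 (Nat.succ_ne_zero k)
    have hdl : r / 26 < 26 ^ k := by
      rw [Int.ediv_lt_iff_lt_mul (by norm_num)]
      calc r < 26 ^ (k + 1) := h1
        _ = 26 ^ k * 26 := pow_succ 26 k
    rw [digitsLE_succ, digitsLE_succ]
    by_cases hd : r % 26 < 25
    · simp only [incD, if_pos hd]
      congr 1
      · rw [Int.emod_emod_of_dvd _ hdvd]; omega
      · rw [emod_pow_div, show (r + 1) / 26 = r / 26 by omega, digitsLE_mod]
    · simp only [incD, if_neg hd]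
      congr 1
      · rw [Int.emod_emod_of_dvd _ hdvd]; omega
      · rw [emod_pow_div, show (r + 1) / 26 = r / 26 + 1 by omega]
        exact ih (r / 26) (by omega) hdl

-- § incrementing the odometer is incrementing the digits
lemma incOdo_map (ds : List Int) (h : ∀ d ∈ ds, 0 ≤ d ∧ d < 26) :
    incOdo (ds.map symChar) = (incD ds).map symChar := by
  induction ds with
  | nil => rfl
  | cons d ds ih =>
    have hd := h d List.mem_cons_self
    have hti : ((d.toNat : Int)) = d := Int.toNat_of_nonneg hd.1
    simp only [List.map_cons, incOdo, alpha_index d hd.1 hd.2, genBase_eq, hti]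
    by_cases hlt : d < 25
    · rw [if_pos (by omega : d < (26:Int) - 1), alpha_get (d + 1) (by omega) (by omega)]
      simp [incD, if_pos hlt]
    · rw [if_neg (by omega : ¬ d < (26:Int) - 1), alpha_get 0 (by norm_num) (by norm_num)]
      simp only [incD, if_neg hlt, List.map_cons]
      rw [ih (fun x hx => h x (List.mem_cons_of_mem _ hx))]

-- § membership of forbidden letters
lemma contains_symChar (ds : List Int) (h : ∀ d ∈ ds, 0 ≤ d ∧ d < 26)
    (c : Char) (d : Int) (hd : 0 ≤ d ∧ d < 26) (hc : symChar d = c) :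
    (ds.map symChar).contains c = ds.contains d := by
  apply Bool.eq_iff_iff.mpr
  simp only [List.contains_iff_mem, List.mem_map]
  constructor
  · rintro ⟨x, hx, hxe⟩
    have := symChar_inj (h x hx) hd (hxe.trans hc.symm)
    rwa [← this]
  · intro hdm; exact ⟨d, hdm, hc⟩

-- § infix through map symChar
lemma infix_map_symChar {l : List Int} {ys : List Char} :
    ys <:+: l.map symChar ↔ ∃ xs, xs <:+: l ∧ xs.map symChar = ys := by
  constructor
  · rintro ⟨s, t, h⟩
    have h2 : List.map symChar l = s ++ (ys ++ t) := by
      rw [← h]; simp [List.append_assoc]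
    rcases List.map_eq_append_iff.mp h2 with ⟨l1, l2, rfl, hs, hyt⟩
    rcases List.map_eq_append_iff.mp hyt with ⟨l3, l4, rfl, hy, ht⟩
    exact ⟨l3, ⟨l1, l4, by simp [List.append_assoc]⟩, hy⟩
  · rintro ⟨xs, hinf, rfl⟩
    exact hinf.map symChar

-- § straight-of-three
lemma hasStraight_iff (ds : List Int) :
    hasStraight ds = true ↔ ∃ a : Int, [a, a + 1, a + 2] <:+: ds := by
  induction ds with
  | nil =>
    simp only [hasStraight, Bool.false_eq_true, false_iff, not_exists]
    intro a hinf; have := hinf.length_le; simp at this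
  | cons a tl ih =>
    cases tl with
    | nil =>
      simp only [hasStraight, Bool.false_eq_true, false_iff, not_exists]
      intro x hinf; have := hinf.length_le; simp at this
    | cons b tl2 =>
      cases tl2 with
      | nil =>
        simp only [hasStraight, Bool.false_eq_true, false_iff, not_exists]
        intro x hinf; have := hinf.length_le; simp at this
      | cons c rest =>
        have hstep : hasStraight (a :: b :: c :: rest)
            = ((a + 1 == b && b + 1 == c) || hasStraight (b :: c :: rest)) := by
          simp [hasStraight]
        rw [hstep, Bool.or_eq_true, Bool.and_eq_true, beq_iff_eq, beq_iff_eq, ih]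
        constructor
        · rintro (⟨h1, h2⟩ | ⟨x, hx⟩)
          · refine ⟨a, List.infix_cons_iff.mpr (Or.inl ?_)⟩
            exact List.cons_prefix_cons.mpr ⟨rfl, List.cons_prefix_cons.mpr ⟨by omega,
              List.cons_prefix_cons.mpr ⟨by omega, List.nil_prefix⟩⟩⟩
          · exact ⟨x, List.infix_cons_iff.mpr (Or.inr hx)⟩
        · rintro ⟨x, hx⟩
          rcases List.infix_cons_iff.mp hx with hp | hi
          · left
            rcases List.cons_prefix_cons.mp hp with ⟨h1, hp2⟩
            rcases List.cons_prefix_cons.mp hp2 with ⟨h2, hp3⟩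
            rcases List.cons_prefix_cons.mp hp3 with ⟨h3, _⟩
            omega
          · exact Or.inr ⟨x, hi⟩

lemma triples_eq : INCREASING_TRIPLES =
    (List.range 24).map (fun (k : Nat) => String.ofList [symChar (k : Int), symChar ((k : Int) + 1), symChar ((k : Int) + 2)]) := by
  decide

lemma triple_equiv (ds : List Int) (h : ∀ d ∈ ds, 0 ≤ d ∧ d < 26) :
    (INCREASING_TRIPLES.any fun t => PySem.Str.isIn t (String.ofList (ds.map symChar))) = hasStraight ds := by
  apply Bool.eq_iff_iff.mpr
  rw [List.any_eq_true, hasStraight_iff]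
  constructor
  · rintro ⟨t, ht, hin⟩
    rw [triples_eq] at ht
    rcases List.mem_map.mp ht with ⟨k, hk, rfl⟩
    have hk24 : k < 24 := by simpa using hk
    have hin' : ([symChar (k : Int), symChar ((k : Int) + 1), symChar ((k : Int) + 2)] <:+: ds.map symChar) := by
      have := (PySem.Str.isIn_iff_infix _ _).mp hin
      simpa [String.toList_ofList] using this
    rcases infix_map_symChar.mp hin' with ⟨xs, hinf, hmap⟩
    rcases xs with _ | ⟨x1, _ | ⟨x2, _ | ⟨x3, _ | ⟨x4, xs⟩⟩⟩⟩ <;> simp only [List.map_cons, List.map_nil,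
      List.cons.injEq, and_true, List.cons_ne_nil] at hmap
    · exact absurd hmap (by simp)
    · exact absurd hmap (by simp)
    · exact absurd hmap (by simp)
    case _ =>
      obtain ⟨hm1, hm2, hm3⟩ := hmap
      have hx1 := h x1 (hinf.subset (by simp))
      have hx2 := h x2 (hinf.subset (by simp))
      have hx3 := h x3 (hinf.subset (by simp))
      have hkb0 : (0:Int) ≤ (k : Int) ∧ (k : Int) < 26 := by constructor <;> omega
      have hkb1 : (0:Int) ≤ (k : Int) + 1 ∧ (k : Int) + 1 < 26 := by constructor <;> omega
      have hkb2 : (0:Int) ≤ (k : Int) + 2 ∧ (k : Int) + 2 < 26 := by constructor <;> omega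
      have e1 : x1 = (k : Int) := symChar_inj hx1 hkb0 hm1
      have e2 : x2 = (k : Int) + 1 := symChar_inj hx2 hkb1 hm2
      have e3 : x3 = (k : Int) + 2 := symChar_inj hx3 hkb2 hm3
      refine ⟨x1, ?_⟩
      rwa [show x1 + 1 = x2 by omega, show x1 + 2 = x3 by omega]
    · exact absurd hmap (by simp)
  · rintro ⟨a, hinf⟩
    have ha0 := h a (hinf.subset (by simp))
    have ha2 := h (a + 2) (hinf.subset (by simp))
    have hk24 : a.toNat < 24 := by omega
    refine ⟨String.ofList [symChar (a.toNat : Int), symChar ((a.toNat : Int) + 1), symChar ((a.toNat : Int) + 2)], ?_, ?_⟩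
    · rw [triples_eq]
      refine List.mem_map.mpr ⟨a.toNat, ?_, rfl⟩
      simpa using hk24
    · rw [PySem.Str.isIn_iff_infix]
      have hca : ((a.toNat : Int)) = a := Int.toNat_of_nonneg ha0.1
      simp only [String.toList_ofList, hca]
      exact hinf.map symChar

-- § pairs
lemma collectPairs_mem : ∀ (ds : List Int) (s : PySem.Set Int) (x : Int),
    x ∈ collectPairs s ds ↔ x ∈ s ∨ [x, x] <:+: ds := by
  intro ds
  induction ds with
  | nil => intro s x; simp [collectPairs]
  | cons a tl ih =>
    cases tl with
    | nil =>
      intro s x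
      have hni : ¬ ([x, x] <:+: [a]) := by
        intro hinf; have := hinf.length_le; simp at this
      simp [collectPairs, hni]
    | cons b rest =>
      intro s x
      have hstep : collectPairs s (a :: b :: rest)
          = collectPairs (if a == b then PySem.Set.add s a else s) (b :: rest) := by
        simp [collectPairs]
      rw [hstep, ih]
      have hinf : ([x, x] <:+: a :: b :: rest) ↔ ((x = a ∧ x = b) ∨ [x, x] <:+: b :: rest) := by
        rw [List.infix_cons_iff]
        constructor
        · rintro (hp | hi)
          · rcases List.cons_prefix_cons.mp hp with ⟨h1, hp2⟩
            rcases List.cons_prefix_cons.mp hp2 with ⟨h2, _⟩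
            exact Or.inl ⟨h1, h2⟩
          · exact Or.inr hi
        · rintro (⟨rfl, h2⟩ | hi)
          · exact Or.inl (List.cons_prefix_cons.mpr ⟨rfl,
              List.cons_prefix_cons.mpr ⟨h2, List.nil_prefix⟩⟩)
          · exact Or.inr hi
      rw [hinf]
      by_cases hab : a = b
      · subst hab
        simp only [BEq.rfl, if_true, PySem.Set.mem_add]
        tauto
      · rw [if_neg (by simpa using hab)]
        constructor
        · rintro (h | h)
          · exact Or.inl h
          · exact Or.inr (Or.inr h)
        · rintro (h | (⟨rfl, h2⟩ | h))
          · exact Or.inl h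
          · exact absurd h2 hab
          · exact Or.inr h

lemma collectPairs_nodup : ∀ (ds : List Int) (s : PySem.Set Int), s.Nodup → (collectPairs s ds).Nodup := by
  intro ds
  induction ds with
  | nil => intro s hs; exact hs
  | cons a tl ih =>
    cases tl with
    | nil => intro s hs; exact hs
    | cons b rest =>
      intro s hs
      have hstep : collectPairs s (a :: b :: rest)
          = collectPairs (if a == b then PySem.Set.add s a else s) (b :: rest) := by
        simp [collectPairs]
      rw [hstep]
      apply ih
      split
      · exact PySem.Set.nodup_add _ _ hs
      · exact hs

lemma pairs_count (ds : List Int) (h : ∀ d ∈ ds, 0 ≤ d ∧ d < 26) :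
    (PAIRS.foldl (fun acc p => if PySem.Str.isIn p (String.ofList (ds.map symChar)) then acc + 1 else acc) (0 : Int))
      = PySem.Set.len (collectPairs PySem.Set.empty ds) := by
  rw [PySem.List.foldl_if_add_one, zero_add]
  have hS := collectPairs_mem ds PySem.Set.empty
  have hSnd : (collectPairs PySem.Set.empty ds).Nodup := collectPairs_nodup ds _ List.nodup_nil
  have hSsub : ∀ x ∈ collectPairs PySem.Set.empty ds, 0 ≤ x ∧ x < 26 := by
    intro x hx
    rcases (hS x).mp hx with hmem | hinf
    · simp [PySem.Set.empty] at hmem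
    · exact h x (hinf.subset (by simp))
  unfold PAIRS
  rw [List.countP_map]
  simp only [Function.comp_def]
  have hpair : ∀ c : Char,
      (PySem.Str.isIn (String.ofList (PySem.List.pyRepeat [c] 2)) (String.ofList (ds.map symChar))) = true
        ↔ [c, c] <:+: ds.map symChar := by
    intro c
    rw [PySem.Str.isIn_iff_infix]
    have : PySem.List.pyRepeat [c] 2 = [c, c] := by
      rw [PySem.List.pyRepeat_singleton]; rfl
    simp [this, String.toList_ofList]
  have hperm : ((collectPairs PySem.Set.empty ds).map symChar).Perm
      (ALPHABET.filter (fun c => PySem.Str.isIn (String.ofList (PySem.List.pyRepeat [c] 2)) (String.ofList (ds.map symChar)))) := by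
    rw [List.perm_ext_iff_of_nodup]
    · intro c
      rw [List.mem_filter, List.mem_map]
      constructor
      · rintro ⟨x, hx, rfl⟩
        have hxb := hSsub x hx
        rcases (hS x).mp hx with hmem | hinf
        · simp [PySem.Set.empty] at hmem
        · refine ⟨?_, (hpair _).mpr ?_⟩
          · rw [alpha_eq]
            refine List.mem_map.mpr ⟨x.toNat, List.mem_range.mpr (by omega), ?_⟩
            rw [Int.toNat_of_nonneg hxb.1]
          · have := hinf.map symChar
            simpa using this
      · rintro ⟨hca, hin⟩
        have hinf := (hpair c).mp hin
        rcases infix_map_symChar.mp hinf with ⟨xs, hxinf, hmap⟩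
        rcases xs with _ | ⟨x1, _ | ⟨x2, _ | ⟨x3, xs⟩⟩⟩ <;> simp only [List.map_cons, List.map_nil,
          List.cons.injEq, and_true] at hmap
        · exact absurd hmap (by simp)
        · exact absurd hmap (by simp)
        case _ =>
          obtain ⟨hm1, hm2⟩ := hmap
          have hx1 := h x1 (hxinf.subset (by simp))
          have hx2 := h x2 (hxinf.subset (by simp))
          have e12 : x1 = x2 := symChar_inj hx1 hx2 (hm1.trans hm2.symm)
          refine ⟨x1, ?_, hm1⟩
          rw [hS]
          exact Or.inr (by rwa [show [x1, x1] = [x1, x2] by rw [e12]])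
        · exact absurd hmap (by simp)
    · refine List.Nodup.map_on ?_ hSnd
      intro x hx y hy hxy
      exact symChar_inj (hSsub x hx) (hSsub y hy) hxy
    · exact List.Nodup.filter _ (by decide : ALPHABET.Nodup)
  have hlen : (collectPairs PySem.Set.empty ds).length
      = (ALPHABET.filter (fun c => PySem.Str.isIn (String.ofList (PySem.List.pyRepeat [c] 2)) (String.ofList (ds.map symChar)))).length := by
    rw [← hperm.length_eq, List.length_map]
  rw [List.countP_eq_length_filter, ← hlen]
  simp [PySem.Set.len]

-- § validity checks agree
lemma ok_eq (ds : List Int) (h : ∀ d ∈ ds, 0 ≤ d ∧ d < 26) :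
    pwd_is_ok (String.ofList (ds.map symChar)) = okDigits ds := by
  simp only [pwd_is_ok, okDigits, triple_equiv ds h, pairs_count ds h]

-- § digit/arithmetic helpers for the jumping loop
lemma ediv_pow_succ (m : Int) (k : Nat) : m / 26 ^ k / 26 = m / 26 ^ (k + 1) := by
  rw [Int.ediv_ediv_of_nonneg (by positivity : (0:Int) ≤ 26 ^ k), ← pow_succ]

lemma ediv_pow_succ' (m : Int) (k : Nat) : m / 26 / 26 ^ k = m / 26 ^ (k + 1) := by
  rw [Int.ediv_ediv_of_nonneg (by norm_num : (0:Int) ≤ 26), ← pow_succ']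

lemma digitsLE_snoc (m : Int) (k : Nat) :
    digitsLE m (k + 1) = digitsLE m k ++ [m / 26 ^ k % 26] := by
  induction k generalizing m with
  | zero => simp [digitsLE]
  | succ k ih =>
    rw [digitsLE_succ, ih, digitsLE_succ]
    simp [ediv_pow_succ']

lemma set_append_len {α : Type} (l1 : List α) (x : α) (rest : List α) (v : α) :
    (l1 ++ x :: rest).set l1.length v = l1 ++ v :: rest := by
  induction l1 with
  | nil => rfl
  | cons a l ih => simp [ih]

lemma set_append_len' {α : Type} (l1 : List α) (n : Nat) (h : l1.length = n)
    (x : α) (rest : List α) (v : α) :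
    (l1 ++ x :: rest).set n v = l1 ++ v :: rest := by
  subst h; exact set_append_len l1 x rest v

lemma getD_append_len {α : Type} (l1 : List α) (x : α) (rest : List α) (d : α) :
    (l1 ++ x :: rest).getD l1.length d = x := by
  simp

lemma getD_append_len' {α : Type} (l1 : List α) (n : Nat) (h : l1.length = n)
    (x : α) (rest : List α) (d : α) : (l1 ++ x :: rest).getD n d = x := by
  subst h; exact getD_append_len l1 x rest d

lemma incLE_eq_incD (ds : List Int) (h : ∀ d ∈ ds, 0 ≤ d ∧ d < 26) : incLE ds = incD ds := by
  induction ds with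
  | nil => rfl
  | cons d rest ih =>
    have hd := h d List.mem_cons_self
    by_cases h25 : d = 25
    · simp [incLE, incD, h25, ih (fun x hx => h x (List.mem_cons_of_mem _ hx))]
    · simp [incLE, incD, h25, show d < 25 by omega]

lemma digitsLE_getD (m : Int) (R j : Nat) (hj : j < R) :
    (digitsLE m R).getD j 0 = m / 26 ^ j % 26 := by
  induction R generalizing m j with
  | zero => omega
  | succ R ih =>
    rw [digitsLE_succ]
    cases j with
    | zero => simp
    | succ j =>
      simp only [List.getD_cons_succ]
      rw [ih _ _ (by omega), ediv_pow_succ']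

lemma emod_pow_decomp (m : Int) (k : Nat) :
    m % 26 ^ (k + 1) = m % 26 ^ k + 26 ^ k * (m / 26 ^ k % 26) := by
  have h := ediv_pow_succ m k
  rw [Int.emod_def, Int.emod_def, Int.emod_def, ← h]
  ring

lemma ediv_add_small (m : Int) (q : Nat) (k : Int) (hk0 : 0 ≤ k) (hk : k < 26 ^ q - m % 26 ^ q) :
    (m + k) / 26 ^ q = m / 26 ^ q := by
  have hl0 : 0 ≤ m % 26 ^ q := Int.emod_nonneg _ (by positivity)
  have hsplit : m + k = (m % 26 ^ q + k) + 26 ^ q * (m / 26 ^ q) := by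
    have := Int.emod_def m (26 ^ q)
    omega
  rw [hsplit, Int.add_mul_ediv_left _ _ (by positivity : (26:Int) ^ q ≠ 0),
    Int.ediv_eq_zero_of_lt (by omega) (by omega), zero_add]

-- § the last-forbidden-index fold
lemma lastIdx_fold (R : Nat) (g : Int → Bool) :
    (((PySem.List.pyRange 0 (R : Int) 1).foldl (fun acc i => if g i then i else acc) (-1) = -1
        ∧ ∀ j : Nat, j < R → g (j : Int) = false)
      ∨ (∃ q : Nat, q < R
          ∧ (PySem.List.pyRange 0 (R : Int) 1).foldl (fun acc i => if g i then i else acc) (-1) = (q : Int)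
          ∧ g (q : Int) = true ∧ ∀ j : Nat, q < j → j < R → g (j : Int) = false)) := by
  induction R with
  | zero =>
    left
    constructor
    · rfl
    · omega
  | succ R ih =>
    have hsp : PySem.List.pyRange 0 ((R + 1 : Nat) : Int) 1
        = PySem.List.pyRange 0 (R : Int) 1 ++ [(R : Int)] := by
      rw [show (((R + 1) : Nat) : Int) = (R : Int) + 1 by push_cast; ring]
      exact PySem.List.pyRange_one_succ_right (by positivity)
    rw [hsp, List.foldl_append]
    simp only [List.foldl_cons, List.foldl_nil]
    by_cases hgR : g (R : Int) = true
    · right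
      refine ⟨R, by omega, by rw [if_pos hgR], hgR, by omega⟩
    · rw [if_neg hgR]
      rcases ih with ⟨h1, h2⟩ | ⟨q, hq, hfold, hgq, hnone⟩
      · left
        refine ⟨h1, ?_⟩
        intro j hj
        rcases Nat.lt_succ_iff_lt_or_eq.mp hj with hj' | rfl
        · exact h2 j hj'
        · exact Bool.eq_false_iff.mpr hgR
      · right
        refine ⟨q, by omega, hfold, hgq, ?_⟩
        intro j hj1 hj2
        rcases Nat.lt_succ_iff_lt_or_eq.mp hj2 with hj' | rfl
        · exact hnone j hj1 hj'
        · exact Bool.eq_false_iff.mpr hgR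

-- § the suffix-value fold
lemma suf_fold (r : Int) (R : Nat) (q : Nat) (hq : q ≤ R) :
    ((PySem.List.pyRange 0 (q : Int) 1).foldl
      (fun (sw : Int × Int) j => (sw.1 + PySem.List.pyGetD (digitsLE r R) j 0 * sw.2, sw.2 * 26)) (0, 1))
      = (r % 26 ^ q, 26 ^ q) := by
  induction q with
  | zero => simp [PySem.List.pyRange_one_eq_nil (by norm_num : (0:Int) ≤ 0)]
  | succ q ih =>
    have hq' : q ≤ R := by omega
    have hsp : PySem.List.pyRange 0 ((q + 1 : Nat) : Int) 1
        = PySem.List.pyRange 0 (q : Int) 1 ++ [(q : Int)] := by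
      rw [show (((q + 1) : Nat) : Int) = (q : Int) + 1 by push_cast; ring]
      exact PySem.List.pyRange_one_succ_right (by positivity)
    rw [hsp, List.foldl_append, ih hq']
    simp only [List.foldl_cons, List.foldl_nil, PySem.List.pyGetD_natCast]
    rw [show (digitsLE r R).getD q 0 = r / 26 ^ q % 26 from digitsLE_getD r R q (by omega)]
    rw [Prod.mk.injEq]
    constructor
    · rw [emod_pow_decomp]; ring
    · rw [pow_succ]

-- § the zeroing fold and the jump target's digits
lemma zeros_fold (ds : List Int) (q : Nat) (hq : q ≤ ds.length) :
    (PySem.List.pyRange 0 (q : Int) 1).foldl (fun l j => PySem.List.pySetD l j 0) ds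
      = List.replicate q 0 ++ ds.drop q := by
  induction q with
  | zero => simp [PySem.List.pyRange_one_eq_nil (by norm_num : (0:Int) ≤ 0)]
  | succ q ih =>
    have hq' : q ≤ ds.length := by omega
    have hsp : PySem.List.pyRange 0 ((q + 1 : Nat) : Int) 1
        = PySem.List.pyRange 0 (q : Int) 1 ++ [(q : Int)] := by
      rw [show (((q + 1) : Nat) : Int) = (q : Int) + 1 by push_cast; ring]
      exact PySem.List.pyRange_one_succ_right (by positivity)
    rw [hsp, List.foldl_append, ih hq']
    simp only [List.foldl_cons, List.foldl_nil, PySem.List.pySetD_natCast]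
    rw [List.drop_eq_getElem_cons (by omega : q < ds.length),
      set_append_len' _ q (by simp), ← List.singleton_append, ← List.append_assoc,
      ← List.replicate_succ']
    

lemma skip_digits (r : Int) (R q : Nat) (hq : q < R) (h0 : 0 ≤ r)
    (hdq : r / 26 ^ q % 26 < 25) :
    digitsLE (r + (26 ^ q - r % 26 ^ q)) R
      = List.replicate q 0 ++ (r / 26 ^ q % 26 + 1) :: (digitsLE r R).drop (q + 1) := by
  induction q generalizing r R with
  | zero =>
    obtain ⟨R', rfl⟩ : ∃ R', R = R' + 1 := ⟨R - 1, by omega⟩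
    simp only [pow_zero, Int.emod_one, sub_zero, List.replicate_zero, List.nil_append,
      Int.ediv_one] at hdq ⊢
    rw [digitsLE_succ, digitsLE_succ]
    simp only [List.drop_succ_cons, List.drop_zero]
    congr 1
    · omega
    · rw [show r + 1 = r + 1 from rfl, show (r + 1) / 26 = r / 26 by omega]
  | succ q ih =>
    obtain ⟨R', rfl⟩ : ∃ R', R = R' + 1 := ⟨R - 1, by omega⟩
    have hkey : r + (26 ^ (q + 1) - r % 26 ^ (q + 1))
        = 26 * ((r / 26) + (26 ^ q - (r / 26) % 26 ^ q)) := by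
      rw [Int.emod_def, Int.emod_def, ← ediv_pow_succ' r q, pow_succ]
      ring
    have hdq' : (r / 26) / 26 ^ q % 26 < 25 := by rwa [ediv_pow_succ']
    rw [hkey, digitsLE_succ, Int.mul_emod_right, Int.mul_ediv_cancel_left _ (by norm_num : (26:Int) ≠ 0)]
    rw [ih (r / 26) R' (by omega) (Int.ediv_nonneg h0 (by norm_num)) hdq']
    rw [List.replicate_succ, List.cons_append, ediv_pow_succ' r q, digitsLE_succ r R',
      List.drop_succ_cons]

lemma skip_lt (r : Int) (R q : Nat) (hq : q < R) (hr : r < 26 ^ R)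
    (hdq : r / 26 ^ q % 26 < 25) :
    r + (26 ^ q - r % 26 ^ q) < 26 ^ R := by
  have hkey : r + (26 ^ q - r % 26 ^ q) = (r / 26 ^ q + 1) * 26 ^ q := by
    rw [Int.emod_def]; ring
  have hqpos : (0:Int) < 26 ^ q := by positivity
  have hdivlt : r / 26 ^ q < 26 ^ (R - q) := by
    rw [Int.ediv_lt_iff_lt_mul hqpos, ← pow_add]
    rw [show R - q + q = R by omega]
    exact hr
  have hne : r / 26 ^ q + 1 ≠ 26 ^ (R - q) := by
    intro he
    have h26 : (26:Int) ^ (R - q) % 26 = 0 := by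
      rw [show R - q = (R - q - 1) + 1 by omega, pow_succ]
      exact Int.mul_emod_left _ _
    omega
  have hle : r / 26 ^ q + 1 ≤ 26 ^ (R - q) - 1 := by omega
  calc r + (26 ^ q - r % 26 ^ q) = (r / 26 ^ q + 1) * 26 ^ q := hkey
    _ ≤ (26 ^ (R - q) - 1) * 26 ^ q := by
        exact mul_le_mul_of_nonneg_right hle (le_of_lt hqpos)
    _ < 26 ^ (R - q) * 26 ^ q := by nlinarith
    _ = 26 ^ R := by rw [← pow_add]; congr 1; omega

-- § A's loop is a no-op across a block of forbidden candidates
lemma genSkip (R : Nat) : ∀ (d : Nat) (r0 : Int) (fuel : Nat) (pwd : String),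
    0 ≤ r0 → r0 + d ≤ 26 ^ R →
    (∀ k : Nat, k < d → ∃ j : Nat, j < R ∧
        ([8, 11, 14] : List Int).contains ((digitsLE (r0 + k) R).getD j 0) = true) →
    genLoop fuel ((digitsLE r0 R).map symChar) pwd
      = genLoop (fuel - d) ((digitsLE (r0 + (d : Int)) R).map symChar) pwd := by
  intro d
  induction d with
  | zero => intro r0 fuel pwd _ _ _; simp
  | succ d ih =>
    intro r0 fuel pwd h0 hle hforb
    cases fuel with
    | zero => simp [genLoop]
    | succ fuel =>
      obtain ⟨j, hj, hcont⟩ := hforb 0 (by omega)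
      norm_num at hcont
      have hjv : (digitsLE r0 R).getD j 0 = 8 ∨ (digitsLE r0 R).getD j 0 = 11
          ∨ (digitsLE r0 R).getD j 0 = 14 := by
        simpa [List.contains_iff_mem] using hcont
      have hlenR : (digitsLE r0 R).length = R := digitsLE_len _ _
      have hmem : (digitsLE r0 R).getD j 0 ∈ digitsLE r0 R := by
        rw [List.getD_eq_getElem _ _ (by omega)]
        exact List.getElem_mem _
      have hbrev : ∀ x ∈ (digitsLE r0 R).reverse, 0 ≤ x ∧ x < 26 :=
        fun x hx => digitsLE_bounds _ _ x (List.mem_reverse.mp hx)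
      have hcond : (((digitsLE r0 R).reverse.map symChar).contains 'i'
          || ((digitsLE r0 R).reverse.map symChar).contains 'o'
          || ((digitsLE r0 R).reverse.map symChar).contains 'l') = true := by
        rw [contains_symChar _ hbrev 'i' 8 (by norm_num) (by decide),
            contains_symChar _ hbrev 'o' 14 (by norm_num) (by decide),
            contains_symChar _ hbrev 'l' 11 (by norm_num) (by decide)]
        have hmemrev := List.mem_reverse.mpr hmem
        rcases hjv with h | h | h <;> rw [h] at hmemrev <;>
          simp [hmemrev]
      simp only [genLoop]
      rw [slice_rev, ← List.map_reverse, if_pos hcond]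
      rw [incOdo_map _ (digitsLE_bounds _ _), digitsLE_inc R r0 h0 (by push_cast at hle; omega),
        digitsLE_mod]
      have hrec := ih (r0 + 1) fuel pwd (by omega) (by push_cast at hle ⊢; omega) (fun k hk => by
        have hk1 := hforb (k + 1) (by omega)
        rwa [show r0 + ((k + 1 : Nat) : Int) = r0 + 1 + (k : Nat) by push_cast; ring] at hk1)
      rw [hrec, show r0 + 1 + (d : Int) = r0 + ((d + 1 : Nat) : Int) by push_cast; ring,
        Nat.succ_sub_succ]

-- § the two loops agree
lemma loop_eq2 (M : Int) (R : Nat) (hM : M = 26 ^ R) :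
    ∀ (fuelB : Nat) (v : Int) (pwd : String), (M - v).toNat ≤ fuelB →
      genLoop (M - v).toNat ((digitsLE (PySem.Int.mod v M) R).map symChar) pwd
        = bLoop fuelB v (digitsLE (PySem.Int.mod v M) R) M R pwd := by
  have hMpos : (0:Int) < M := by rw [hM]; positivity
  intro fuelB
  induction fuelB with
  | zero =>
    intro v pwd hf
    rw [Nat.le_zero.mp hf]
    rfl
  | succ fuelB ih =>
    intro v pwd hf
    by_cases hv : v < M
    case neg =>
      rw [show (M - v).toNat = 0 by omega]
      simp only [genLoop, bLoop, if_neg hv]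
    case pos =>
      have hmod : PySem.Int.mod v M = v % M := PySem.Int.mod_eq_emod_of_pos hMpos
      rw [hmod]
      set r := v % M with hrdef
      have hr0 : 0 ≤ r := Int.emod_nonneg v (by omega)
      have hrM : r < M := Int.emod_lt_of_pos v hMpos
      have hr26 : r < 26 ^ R := hM ▸ hrM
      have hvler : v ≤ r := by
        by_cases h : 0 ≤ v
        · rw [hrdef, Int.emod_eq_of_lt h hv]
        · omega
      have hds : (digitsLE r R).length = R := digitsLE_len _ _
      have hbnd := digitsLE_bounds r R
      have hbrev : ∀ x ∈ (digitsLE r R).reverse, 0 ≤ x ∧ x < 26 :=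
        fun x hx => hbnd x (List.mem_reverse.mp hx)
      simp only [bLoop, if_pos hv]
      rcases lastIdx_fold R
          (fun i => ([8, 11, 14] : List Int).contains (PySem.List.pyGetD (digitsLE r R) i 0))
        with ⟨hP, hnone⟩ | ⟨q, hqR, hP, hgq, habove⟩
      · -- no forbidden digit: one ordinary candidate step on both sides
        rw [hP, if_neg (by norm_num)]
        rw [show (M - v).toNat = (M - (v + 1)).toNat + 1 by omega]
        simp only [genLoop]
        rw [slice_rev, ← List.map_reverse, PySem.List.slice?_none_none_neg_one, Option.getD_some]
        have hnotmem : (8:Int) ∉ digitsLE r R ∧ (11:Int) ∉ digitsLE r R ∧ (14:Int) ∉ digitsLE r R := by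
          refine ⟨?_, ?_, ?_⟩ <;> intro hmem <;>
            obtain ⟨j, hjlen, hjval⟩ := List.mem_iff_getElem.mp hmem <;>
            · have hj := hnone j (by omega)
              rw [PySem.List.pyGetD_natCast, List.getD_eq_getElem _ _ (by omega), hjval] at hj
              simp at hj
        rw [contains_symChar _ hbrev 'i' 8 (by norm_num) (by decide),
            contains_symChar _ hbrev 'o' 14 (by norm_num) (by decide),
            contains_symChar _ hbrev 'l' 11 (by norm_num) (by decide)]
        have hcf : ((digitsLE r R).reverse.contains 8 || (digitsLE r R).reverse.contains 14
            || (digitsLE r R).reverse.contains 11) = false := by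
          simp [List.mem_reverse, hnotmem.1, hnotmem.2.1, hnotmem.2.2]
        simp only [hcf, Bool.false_eq_true, if_false]
        have hjoinB : ((digitsLE r R).reverse).map (fun d => [symChar d])
            = (((digitsLE r R).reverse).map symChar).map (fun c => [c]) := by
          simp [List.map_map]
        rw [hjoinB, PySem.Chars.join_nil_singletons, ok_eq _ hbrev]
        by_cases hok : okDigits ((digitsLE r R).reverse) = true
        · rw [if_pos hok, if_pos hok]
        · rw [if_neg hok, if_neg hok]
          rw [incOdo_map _ hbnd, incLE_eq_incD _ hbnd, digitsLE_inc R r hr0 hr26, ← hM]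
          have hsh : (r + 1) % M = (v + 1) % M := by
            rw [hrdef]; exact Int.emod_add_emod _ _ _
          have hrec := ih (v + 1) (String.ofList (List.map symChar (digitsLE r R).reverse))
            (by omega)
          rw [PySem.Int.mod_eq_emod_of_pos hMpos] at hrec
          rw [hsh, hrec]
      · -- a forbidden digit at (highest) position q: B jumps the whole block, A crawls over it
        rw [hP, if_pos (by positivity), Int.toNat_natCast]
        rw [suf_fold r R q (by omega), zeros_fold _ q (by omega)]
        simp only [PySem.List.pySetD_natCast, PySem.List.pyGetD_natCast]
        have hgq' : (digitsLE r R).getD q 0 = 8 ∨ (digitsLE r R).getD q 0 = 11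
            ∨ (digitsLE r R).getD q 0 = 14 := by
          have := hgq
          rw [PySem.List.pyGetD_natCast] at this
          simpa [List.contains_iff_mem] using this
        have hdgq : (digitsLE r R).getD q 0 = r / 26 ^ q % 26 := digitsLE_getD r R q hqR
        have hdqlt : r / 26 ^ q % 26 < 25 := by rw [← hdgq]; rcases hgq' with h | h | h <;> omega
        have hdrop : (digitsLE r R).drop q
            = r / 26 ^ q % 26 :: (digitsLE r R).drop (q + 1) := by
          rw [List.drop_eq_getElem_cons (by omega : q < (digitsLE r R).length)]
          congr 1
          rw [← hdgq, List.getD_eq_getElem _ _ (by omega)]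
        have hgetd : (List.replicate q 0 ++ (digitsLE r R).drop q).getD q 0
            = r / 26 ^ q % 26 := by
          rw [hdrop]
          exact getD_append_len' (List.replicate q 0) q (by simp) _ _ _
        rw [hgetd, hdrop, set_append_len' (List.replicate q 0) q (by simp)]
        -- now B's new digit list is exactly digitsLE (r + δ) R
        have hδpos : 0 < 26 ^ q - r % 26 ^ q := by
          have := Int.emod_lt_of_pos r (by positivity : (0:Int) < 26 ^ q)
          omega
        have hr' : r + (26 ^ q - r % 26 ^ q) < 26 ^ R := skip_lt r R q hqR hr26 hdqlt
        have hskip := skip_digits r R q hqR hr0 hdqlt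
        rw [← hskip]
        -- A crawls: every candidate in the block keeps digit q forbidden
        have hδnat : ((26 ^ q - r % 26 ^ q).toNat : Int) = 26 ^ q - r % 26 ^ q :=
          Int.toNat_of_nonneg (by omega)
        have hgs := genSkip R (26 ^ q - r % 26 ^ q).toNat r ((M - v).toNat) pwd hr0
          (by rw [hδnat]; omega)
          (fun k hk => by
            refine ⟨q, hqR, ?_⟩
            have hsm : (r + (k : Int)) / 26 ^ q = r / 26 ^ q :=
              ediv_add_small r q k (by positivity) (by omega)
            rw [digitsLE_getD _ R q hqR, hsm, ← hdgq]
            rcases hgq' with h | h | h <;> rw [h] <;> decide)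
        rw [hgs, hδnat]
        have hfuel2 : (M - v).toNat - (26 ^ q - r % 26 ^ q).toNat
            = (M - (v + (26 ^ q - r % 26 ^ q))).toNat := by omega
        have hvmod : (v + (26 ^ q - r % 26 ^ q)) % M = r + (26 ^ q - r % 26 ^ q) := by
          rw [← Int.emod_add_emod, ← hrdef, Int.emod_eq_of_lt (by omega) (by omega)]
        have hrec := ih (v + (26 ^ q - r % 26 ^ q)) pwd (by omega)
        rw [PySem.Int.mod_eq_emod_of_pos hMpos, hvmod] at hrec
        rw [hfuel2, hrec]

-- § start value: positional sum over the reversed string = Horner fold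
def valLE : List Char → Int
  | [] => 0
  | c :: cs => ((c.toNat : Int) - 97) + 26 * valLE cs

lemma startA_eq (l : List Char) (a r : Int) :
    (l.foldl (fun (st : Int × Int) c => (st.1 + ((c.toNat : Int) - ('a'.toNat : Int)) * st.2, st.2 * genBase)) (a, r)).1
      = a + r * valLE l := by
  induction l generalizing a r with
  | nil => simp [valLE]
  | cons c cs ih =>
    simp only [List.foldl_cons]
    rw [ih]
    simp only [valLE, genBase_eq, show ('a'.toNat : Int) = 97 from rfl]
    ring

lemma valLE_snoc (l : List Char) (c : Char) :
    valLE (l ++ [c]) = valLE l + 26 ^ l.length * ((c.toNat : Int) - 97) := by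
  induction l with
  | nil => simp [valLE]
  | cons d ds ih =>
    simp only [List.cons_append, valLE, ih, List.length_cons, pow_succ]
    ring

lemma horner_eq (l : List Char) (a : Int) :
    l.foldl (fun acc c => acc * 26 + ((c.toNat : Int) - 97)) a = a * 26 ^ l.length + valLE l.reverse := by
  induction l generalizing a with
  | nil => simp [valLE]
  | cons c cs ih =>
    simp only [List.foldl_cons, ih, List.reverse_cons, valLE_snoc, List.length_cons,
      List.length_reverse, pow_succ]
    ring

-- § odometer initialisation produces the digits of the start value
lemma odoInit_eq (R : Nat) (m : Int) :
    ((List.range R).map (fun (k : Nat) => (k : Int))).foldl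
      (fun (st2 : List Char × Int) i =>
        (PySem.List.pySetD st2.1 i (PySem.List.pyGetD ALPHABET (PySem.Int.mod st2.2 genBase) 'a'),
         PySem.Int.floordiv st2.2 genBase))
      (List.replicate R (PySem.List.pyGetD ALPHABET 0 'a'), m)
      = ((digitsLE m R).map symChar, m / 26 ^ R) := by
  suffices haux : ∀ k : Nat, k ≤ R →
      ((List.range k).map (fun (j : Nat) => (j : Int))).foldl
        (fun (st2 : List Char × Int) i =>
          (PySem.List.pySetD st2.1 i (PySem.List.pyGetD ALPHABET (PySem.Int.mod st2.2 genBase) 'a'),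
           PySem.Int.floordiv st2.2 genBase))
        (List.replicate R (PySem.List.pyGetD ALPHABET 0 'a'), m)
        = ((digitsLE m k).map symChar ++ List.replicate (R - k) (PySem.List.pyGetD ALPHABET 0 'a'),
           m / 26 ^ k) by
    have := haux R le_rfl
    simpa using this
  intro k
  induction k with
  | zero => intro _; simp [digitsLE]
  | succ k ih =>
    intro hk
    have hk' : k ≤ R := by omega
    rw [List.range_succ, List.map_append, List.foldl_append, ih hk']
    simp only [List.map_cons, List.map_nil, List.foldl_cons, List.foldl_nil]
    have hd26 : (0:Int) ≤ m / 26 ^ k % 26 ∧ m / 26 ^ k % 26 < 26 :=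
      ⟨Int.emod_nonneg _ (by norm_num), Int.emod_lt_of_pos _ (by norm_num)⟩
    have hmodg : PySem.Int.mod (m / 26 ^ k) genBase = m / 26 ^ k % 26 := by
      rw [genBase_eq, PySem.Int.mod_eq_emod_of_pos (by norm_num)]
    have hfg : PySem.Int.floordiv (m / 26 ^ k) genBase = m / 26 ^ (k + 1) := by
      rw [genBase_eq, PySem.Int.floordiv_eq_ediv_of_pos (by norm_num), ediv_pow_succ]
    rw [hmodg, hfg, alpha_get _ hd26.1 hd26.2]
    have hrep : List.replicate (R - k) (PySem.List.pyGetD ALPHABET 0 'a')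
        = PySem.List.pyGetD ALPHABET 0 'a' :: List.replicate (R - (k + 1)) (PySem.List.pyGetD ALPHABET 0 'a') := by
      rw [show R - k = (R - (k + 1)) + 1 by omega, List.replicate_succ]
    rw [PySem.List.pySetD_natCast, hrep,
      set_append_len' ((digitsLE m k).map symChar) k (by simp [digitsLE_len]),
      digitsLE_snoc, List.map_append]
    simp

-- ===== VERDICT (by name: the statement is the Claim_ definition above) =====
theorem get_new_password_spec : Claim_equal_get_new_password := by
  intro input _
  unfold Spec_get_new_password
  simp only [get_new_password, get_new_password_alt, PySem.Str.slice?_none_none_neg_one,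
    Option.getD_some, String.toList_ofList]
  rw [startA_eq, horner_eq]
  simp only [zero_add, one_mul, zero_mul]
  -- abbreviations
  rw [PySem.Str.len_eq]
  simp only [Int.toNat_natCast]
  rw [PySem.List.pyRange_zero]
  simp only [Int.toNat_natCast]
  have hconst : ((List.range input.toList.length).map (fun (k : Nat) => (k : Int))).map
      (fun _ => PySem.List.pyGetD ALPHABET 0 'a')
      = List.replicate input.toList.length (PySem.List.pyGetD ALPHABET 0 'a') := by
    rw [List.map_map]
    rw [show ((fun _ => PySem.List.pyGetD ALPHABET 0 'a') ∘ (fun (k : Nat) => (k : Int)))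
        = (fun (_ : Nat) => PySem.List.pyGetD ALPHABET 0 'a') from rfl]
    rw [List.map_const', List.length_range]
  rw [hconst, odoInit_eq]
  simp only [genBase_eq]
  set R := input.toList.length with hR
  set n := valLE input.toList.reverse with hn
  have hdig : (digitsLE (n + 1) R).map symChar
      = (digitsLE (PySem.Int.mod (n + 1) ((26:Int) ^ R)) R).map symChar := by
    rw [PySem.Int.mod_eq_emod_of_pos (by positivity), digitsLE_mod]
  by_cases hvM : n + 1 < (26 : Int) ^ R
  · rw [if_pos hvM, hdig]
    have := loop_eq2 ((26:Int) ^ R) R rfl ((26 ^ R - (n + 1)).toNat) (n + 1) input le_rfl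
    rw [← hdig] at this ⊢
    rw [hdig] at this ⊢
    exact this
  · rw [if_neg hvM, show ((26 : Int) ^ R - (n + 1)).toNat = 0 by omega]
    rfl
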